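-- pv_equiv track=rewrite | github.com/Nikitosch/Lab4-INF | main.py | convert_sms
-- ===== SOURCE A (Python) =====
-- def convert_sms(row, spaces, teg_name = "", dop_param = "", flag = True):
--     li, tegli = [], []
--     if dop_param:
--         tegli.append(" "*spaces+teg_name+": "+dop_param)
--         teg_name = ""
--     first_flag = " -" if flag else "  "
--     if teg_name:
--         tegli.append(" "*spaces+teg_name+":")
--     cnt = 0
--     subrow = ""
--     for i in row:
--         subrow+=i
--         if i == '"':
--             cnt+=1
--         if cnt == 2:
--             li.append(" "*(spaces+2) + first_flag + " " +subrow)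
--             first_flag = " "
--             cnt, subrow = 0, ""
--     return tegli, li
-- ===== SOURCE B (Python) =====
-- def convert_sms(row, spaces, teg_name="", dop_param="", flag=True):
--     tegli = []
--     if dop_param:
--         tegli.append(" " * spaces + teg_name + ": " + dop_param)
--         teg_name = ""
--     if teg_name:
--         tegli.append(" " * spaces + teg_name + ":")
--     indent = " " * (spaces + 2)
--     first = " -" if flag else "  "
--     qs = [k for k, c in enumerate(row) if c == '"']
--     it = iter(qs)
--     li, start = [], 0
--     for _a, b2 in zip(it, it):  # consecutive pairs of quote positions
--         li.append(indent + (first if not li else " ") + " " + row[start:b2 + 1])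
--         start = b2 + 1
--     return tegli, li
-- ===== Notes on version B (the rewrite author's own statement) =====
-- stated objective: alternative
-- what changed: A threads a per-character state machine (quote counter + growing subrow accumulator) over the string; B collects all quote positions in one comprehension, pairs them up with zip(it, it), and slices the row from the char after the previous emit through each second quote.
import Mathlib
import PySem

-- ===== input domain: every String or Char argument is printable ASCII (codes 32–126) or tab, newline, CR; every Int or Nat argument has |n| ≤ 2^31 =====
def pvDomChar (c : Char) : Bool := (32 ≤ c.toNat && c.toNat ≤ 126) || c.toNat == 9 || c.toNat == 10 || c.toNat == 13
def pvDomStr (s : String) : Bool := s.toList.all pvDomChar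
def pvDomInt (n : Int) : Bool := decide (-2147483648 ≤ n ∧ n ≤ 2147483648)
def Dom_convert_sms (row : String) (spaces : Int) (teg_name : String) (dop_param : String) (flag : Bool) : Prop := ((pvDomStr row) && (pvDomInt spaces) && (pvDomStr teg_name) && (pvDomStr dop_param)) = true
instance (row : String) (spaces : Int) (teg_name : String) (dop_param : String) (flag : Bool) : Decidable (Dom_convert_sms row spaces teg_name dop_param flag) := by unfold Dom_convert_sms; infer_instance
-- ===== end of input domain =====

-- B replaces A's per-character counter/accumulator state machine by collecting the quote
-- positions once and pairing them up, slicing the row between pairs (objective: alternative).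


-- ===== PORT A =====
-- the body of A's `for i in row` loop; state = (li, first_flag, cnt, subrow)
def pvStepA (spaces : Int) (st : List String × List Char × Int × List Char) (i : Char) :
    List String × List Char × Int × List Char :=
  let subrow := st.2.2.2 ++ [i]
  let cnt := if i = '"' then st.2.2.1 + 1 else st.2.2.1
  if cnt = 2 then
    (st.1 ++ [String.ofList (PySem.List.pyRepeat [' '] (spaces + 2) ++ st.2.1 ++ ' ' :: subrow)],
      [' '], 0, [])
  else (st.1, st.2.1, cnt, subrow)

def convert_sms (row : String) (spaces : Int) (teg_name : String) (dop_param : String) (flag : Bool) : List String × List String :=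
  let tegli : List String :=
    if dop_param ≠ "" then
      [String.ofList (PySem.List.pyRepeat [' '] spaces ++ teg_name.toList ++ ':' :: ' ' :: dop_param.toList)]
    else []
  let teg_name' := if dop_param ≠ "" then "" else teg_name
  let first_flag : List Char := if flag then [' ', '-'] else [' ', ' ']
  let tegli :=
    if teg_name' ≠ "" then
      tegli ++ [String.ofList (PySem.List.pyRepeat [' '] spaces ++ teg_name'.toList ++ [':'])]
    else tegli
  let st := row.toList.foldl (pvStepA spaces) ([], first_flag, 0, [])
  (tegli, st.1)

-- ===== PORT B =====
-- `for _a, b2 in zip(it, it)` over the quote-position list: consume positions pairwise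
def pvQuotePairsEmit (ind first : List Char) (row : List Char) : Int → Bool → List Int → List String
  | start, liEmpty, _a :: b2 :: rest =>
      String.ofList (ind ++ (if liEmpty then first else [' ']) ++ ' ' ::
          PySem.Chars.slice row (some start) (some (b2 + 1))) ::
        pvQuotePairsEmit ind first row (b2 + 1) false rest
  | _, _, _ => []

def convert_sms_alt (row : String) (spaces : Int) (teg_name : String) (dop_param : String) (flag : Bool) : List String × List String :=
  let tegli : List String :=
    if dop_param ≠ "" then
      [String.ofList (PySem.List.pyRepeat [' '] spaces ++ teg_name.toList ++ ':' :: ' ' :: dop_param.toList)]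
    else []
  let teg_name' := if dop_param ≠ "" then "" else teg_name
  let tegli :=
    if teg_name' ≠ "" then
      tegli ++ [String.ofList (PySem.List.pyRepeat [' '] spaces ++ teg_name'.toList ++ [':'])]
    else tegli
  let ind := PySem.List.pyRepeat [' '] (spaces + 2)
  let first : List Char := if flag then [' ', '-'] else [' ', ' ']
  let qs := (PySem.List.enumerate row.toList 0).filterMap (fun p => if p.2 = '"' then some p.1 else none)
  (tegli, pvQuotePairsEmit ind first row.toList 0 true qs)

-- ===== PRECONDITION & SPEC =====
def Spec_convert_sms (row : String) (spaces : Int) (teg_name : String) (dop_param : String) (flag : Bool) (out : List String × List String) : Prop := out = convert_sms_alt row spaces teg_name dop_param flag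
instance (row : String) (spaces : Int) (teg_name : String) (dop_param : String) (flag : Bool) (out : List String × List String) : Decidable (Spec_convert_sms row spaces teg_name dop_param flag out) := by unfold Spec_convert_sms; infer_instance

-- ===== CLAIM (what is proved, stated in full; the proofs are below) =====
def Claim_equal_convert_sms : Prop := ∀ (row : String) (spaces : Int) (teg_name : String) (dop_param : String) (flag : Bool), Dom_convert_sms row spaces teg_name dop_param flag → Spec_convert_sms row spaces teg_name dop_param flag (convert_sms row spaces teg_name dop_param flag)

-- ===== LEMMAS AND PROOFS =====

-- the completed two-quote chunks of a char list: p = chars pending since the last emit, q = a quote already seen in p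
def pvChunks (p : List Char) (q : Bool) : List Char → List (List Char)
  | [] => []
  | c :: r =>
      if c = '"' then
        if q then (p ++ [c]) :: pvChunks [] false r else pvChunks (p ++ [c]) true r
      else pvChunks (p ++ [c]) q r

-- format the chunk list: the first line gets ff, the rest get " "
def pvFmt (ind ff : List Char) : List (List Char) → List String
  | [] => []
  | u :: us => String.ofList (ind ++ ff ++ ' ' :: u) :: pvFmt ind [' '] us

lemma pvStepA_quote0 (spaces : Int) (li : List String) (ff s : List Char) :
    pvStepA spaces (li, ff, 0, s) '"' = (li, ff, 1, s ++ ['"']) := by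
  simp [pvStepA]

lemma pvStepA_quote1 (spaces : Int) (li : List String) (ff s : List Char) :
    pvStepA spaces (li, ff, 1, s) '"'
      = (li ++ [String.ofList (PySem.List.pyRepeat [' '] (spaces + 2) ++ ff ++ ' ' :: (s ++ ['"']))],
          [' '], 0, []) := by
  simp [pvStepA]

lemma pvStepA_other (spaces : Int) (li : List String) (ff s : List Char) (cnt : Int) (c : Char)
    (hc : c ≠ '"') (hcnt : cnt ≠ 2) :
    pvStepA spaces (li, ff, cnt, s) c = (li, ff, cnt, s ++ [c]) := by
  simp [pvStepA, hc, hcnt]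

lemma pvLoopA (spaces : Int) (cs : List Char) : ∀ (acc : List String) (ff s : List Char) (q : Bool),
    (cs.foldl (pvStepA spaces) (acc, ff, (if q then 1 else 0 : Int), s)).1
      = acc ++ pvFmt (PySem.List.pyRepeat [' '] (spaces + 2)) ff (pvChunks s q cs) := by
  induction cs with
  | nil => intro acc ff s q; simp [pvChunks, pvFmt]
  | cons c r ih =>
      intro acc ff s q
      by_cases hc : c = '"'
      · subst hc
        cases q with
        | false =>
            rw [List.foldl_cons]
            rw [show (if (false : Bool) then (1:Int) else 0) = 0 from rfl, pvStepA_quote0]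
            simpa [pvChunks] using ih acc ff (s ++ ['"']) true
        | true =>
            rw [List.foldl_cons]
            rw [show (if (true : Bool) then (1:Int) else 0) = 1 from rfl, pvStepA_quote1]
            have h := ih (acc ++ [String.ofList (PySem.List.pyRepeat [' '] (spaces + 2) ++ ff ++ ' ' :: (s ++ ['"']))]) [' '] [] false
            simpa [pvChunks, pvFmt] using h
      · rw [List.foldl_cons, pvStepA_other spaces acc ff s _ c hc (by cases q <;> simp)]
        simpa [pvChunks, hc] using ih acc ff (s ++ [c]) q

lemma pvDecomp (cs : List Char) : '"' ∉ cs ∨ ∃ t r, '"' ∉ t ∧ cs = t ++ '"' :: r := by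
  induction cs with
  | nil => left; simp
  | cons c cs ih =>
      by_cases hc : c = '"'
      · right; exact ⟨[], cs, by simp, by simp [hc]⟩
      · rcases ih with h | ⟨t, r, ht, rfl⟩
        · left; simp [h, Ne.symm hc]
        · right; exact ⟨c :: t, r, by simp [ht, Ne.symm hc], by simp⟩

lemma pvChunks_append (t : List Char) (ht : '"' ∉ t) : ∀ (p : List Char) (q : Bool) (v : List Char),
    pvChunks p q (t ++ v) = pvChunks (p ++ t) q v := by
  induction t with
  | nil => intro p q v; simp
  | cons c t ih =>
      intro p q v
      have hc : c ≠ '"' := fun h => ht (by simp [h])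
      have ht' : '"' ∉ t := fun h => ht (by simp [h])
      simp only [List.cons_append, pvChunks, if_neg hc]
      rw [ih ht' (p ++ [c]) q v]
      simp

lemma pvChunks_free (v : List Char) (hv : '"' ∉ v) (p : List Char) (q : Bool) :
    pvChunks p q v = [] := by
  have h := pvChunks_append v hv p q []
  simpa [pvChunks] using h

lemma pvQs_free (t : List Char) (ht : '"' ∉ t) : ∀ (v : List Char) (s : Int),
    (PySem.List.enumerate (t ++ v) s).filterMap (fun p => if p.2 = '"' then some p.1 else none)
      = (PySem.List.enumerate v (s + t.length)).filterMap (fun p => if p.2 = '"' then some p.1 else none) := by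
  induction t with
  | nil => intro v s; simp
  | cons c t ih =>
      intro v s
      have hc : c ≠ '"' := fun h => ht (by simp [h])
      have ht' : '"' ∉ t := fun h => ht (by simp [h])
      rw [List.cons_append, PySem.List.enumerate_cons, List.filterMap_cons]
      simp only [if_neg hc]
      rw [ih ht' v (s + 1)]
      congr 2
      push_cast [List.length_cons]
      ring

lemma pvQs_cons (v : List Char) (s : Int) :
    (PySem.List.enumerate ('"' :: v) s).filterMap (fun p => if p.2 = '"' then some p.1 else none)
      = s :: (PySem.List.enumerate v (s + 1)).filterMap (fun p => if p.2 = '"' then some p.1 else none) := by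
  rw [PySem.List.enumerate_cons, List.filterMap_cons]
  simp

lemma pvEmitB (ind first : List Char) : ∀ (n : Nat) (cs : List Char), cs.length ≤ n →
    ∀ (row : List Char) (start : Nat) (b : Bool), row.drop start = cs →
    pvQuotePairsEmit ind first row (start : Int) b
        ((PySem.List.enumerate cs (start : Int)).filterMap (fun p => if p.2 = '"' then some p.1 else none))
      = pvFmt ind (if b then first else [' ']) (pvChunks [] false cs) := by
  intro n
  induction n with
  | zero =>
      intro cs hlen row start b _
      have : cs = [] := List.length_eq_zero_iff.mp (Nat.le_zero.mp hlen)
      subst this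
      simp [pvQuotePairsEmit, pvChunks, pvFmt, PySem.List.enumerate]
  | succ m ih =>
      intro cs hlen row start b hrow
      rcases pvDecomp cs with hfree | ⟨t, r, ht, rfl⟩
      · have hq : (PySem.List.enumerate cs (start : Int)).filterMap (fun p => if p.2 = '"' then some p.1 else none) = [] := by
          have h := pvQs_free cs hfree [] (start : Int)
          simpa [PySem.List.enumerate] using h
        rw [hq, pvChunks_free cs hfree [] false]
        simp [pvQuotePairsEmit, pvFmt]
      · rcases pvDecomp r with hrfree | ⟨u, r2, hu, rfl⟩
        · -- exactly one quote remains: no emit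
          have hq : (PySem.List.enumerate (t ++ '"' :: r) (start : Int)).filterMap (fun p => if p.2 = '"' then some p.1 else none)
              = [(start : Int) + t.length] := by
            rw [pvQs_free t ht, pvQs_cons]
            have h := pvQs_free r hrfree [] ((start : Int) + t.length + 1)
            simpa [PySem.List.enumerate] using h
          rw [hq]
          rw [pvChunks_append t ht, show pvChunks ([] ++ t) false ('"' :: r) = pvChunks (t ++ ['"']) true r from by simp [pvChunks]]
          rw [pvChunks_free r hrfree]
          simp [pvQuotePairsEmit, pvFmt]
        · -- two quotes: one chunk, then recurse
          have hq : (PySem.List.enumerate (t ++ '"' :: (u ++ '"' :: r2)) (start : Int)).filterMap (fun p => if p.2 = '"' then some p.1 else none)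
              = ((start : Int) + t.length) :: ((start : Int) + t.length + 1 + u.length) ::
                  (PySem.List.enumerate r2 ((start : Int) + t.length + 1 + u.length + 1)).filterMap (fun p => if p.2 = '"' then some p.1 else none) := by
            rw [pvQs_free t ht, pvQs_cons, pvQs_free u hu, pvQs_cons]
          rw [hq]
          rw [pvQuotePairsEmit]
          -- the slice emitted is exactly the chunk
          have hcast : (start : Int) + t.length + 1 + u.length + 1 = ((start + t.length + u.length + 2 : Nat) : Int) := by push_cast; ring
          have hslice : PySem.Chars.slice row (some (start : Int)) (some ((start : Int) + t.length + 1 + u.length + 1))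
              = t ++ '"' :: u ++ ['"'] := by
            rw [hcast, PySem.Chars.slice_eq_listSlice, PySem.List.slice_natCast, hrow]
            have : start + t.length + u.length + 2 - start = t.length + u.length + 2 := by omega
            rw [this]
            have hsplit : t ++ '"' :: (u ++ '"' :: r2) = (t ++ '"' :: u ++ ['"']) ++ r2 := by simp
            rw [hsplit, List.take_left' (by simp; omega)]
          rw [hslice]
          -- recursive call
          have hrow2 : row.drop (start + t.length + u.length + 2) = r2 := by
            have h := congrArg (List.drop (t.length + u.length + 2)) hrow
            rw [List.drop_drop] at h
            rw [show start + (t.length + u.length + 2) = start + t.length + u.length + 2 from by omega] at h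
            rw [h, show t ++ '"' :: (u ++ '"' :: r2) = (t ++ '"' :: u ++ ['"']) ++ r2 from by simp,
              List.drop_left' (by simp; omega)]
          have hlen2 : r2.length ≤ m := by simp at hlen; omega
          have hrec := ih r2 hlen2 row (start + t.length + u.length + 2) false hrow2
          rw [hcast, hrec]
          -- chunk list unfolds the same way
          rw [pvChunks_append t ht, show pvChunks ([] ++ t) false ('"' :: (u ++ '"' :: r2)) = pvChunks (t ++ ['"']) true (u ++ '"' :: r2) from by simp [pvChunks]]
          rw [pvChunks_append u hu, show pvChunks ((t ++ ['"']) ++ u) true ('"' :: r2) = ((t ++ ['"']) ++ u ++ ['"']) :: pvChunks [] false r2 from by simp [pvChunks]]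
          simp [pvFmt]

-- ===== VERDICT (by name: the statement is the Claim_ definition above) =====
theorem convert_sms_spec : Claim_equal_convert_sms := by
  intro row spaces teg_name dop_param flag _
  unfold Spec_convert_sms
  show (convert_sms row spaces teg_name dop_param flag) = convert_sms_alt row spaces teg_name dop_param flag
  simp only [convert_sms, convert_sms_alt, PySem.List.pyRepeat_singleton]
  refine Prod.ext rfl ?_
  have hA := pvLoopA spaces row.toList [] (if flag then [' ', '-'] else [' ', ' ']) [] false
  norm_num at hA
  have hB := pvEmitB (PySem.List.pyRepeat [' '] (spaces + 2)) (if flag then [' ', '-'] else [' ', ' '])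
      row.toList.length row.toList le_rfl row.toList 0 true (by simp)
  norm_num at hB
  rw [hA, hB]
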